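-- pv_equiv track=rewrite | github.com/zeotq/mai-py-labs | 3.2/task_17.py | handshake_pits
-- ===== SOURCE A (Python) =====
-- def handshake_pits(base_handshakes: dict, lvl: int = 2) -> dict:
--     handshakes = dict()
--     already_shaked_and_self = dict()
--
--     for name in base_handshakes.keys():
--
--         handshakes[name] = dict()
--         already_shaked_and_self[name] = {name}
--
--         for iter in range(lvl):
--             if iter == 0:
--                 iter_handshakes = set().union(base_handshakes[name])
--             else:
--                 iter_handshakes = set()
--                 for new_name in handshakes[name][iter - 1]:
--                     if new_name in base_handshakes:
--                         iter_handshakes.update(base_handshakes[new_name])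
--
--             handshakes[name].update({iter: iter_handshakes.difference(already_shaked_and_self[name])})
--             already_shaked_and_self[name].update(iter_handshakes)
--
--     return handshakes
-- ===== SOURCE B (Python) =====
-- def handshake_pits(base_handshakes: dict, lvl: int = 2) -> dict:
--     handshakes = dict()
--     for name in base_handshakes:
--         # single BFS from name: distance table, then group by layer
--         dist = {name: 0}
--         queue = [name]
--         head = 0
--         while head < len(queue):
--             p = queue[head]
--             head += 1
--             d = dist[p]
--             if d < lvl and p in base_handshakes:
--                 for q in base_handshakes[p]:
--                     if q not in dist:
--                         dist[q] = d + 1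
--                         queue.append(q)
--         result = {i: set() for i in range(lvl)}
--         for person, d in dist.items():
--             if person != name:
--                 result[d - 1].add(person)
--         handshakes[name] = result
--     return handshakes
-- ===== Notes on version B (the rewrite author's own statement) =====
-- stated objective: alternative
-- what changed: A grows one frontier set per level (lvl passes re-reading the previous level's set out of the result dict and subtracting an accumulated seen-set); B instead runs a single FIFO-queue BFS per name that records each person's shortest handshake distance in one dict, then buckets the distance table by layer into pre-initialized level sets.
import Mathlib
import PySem

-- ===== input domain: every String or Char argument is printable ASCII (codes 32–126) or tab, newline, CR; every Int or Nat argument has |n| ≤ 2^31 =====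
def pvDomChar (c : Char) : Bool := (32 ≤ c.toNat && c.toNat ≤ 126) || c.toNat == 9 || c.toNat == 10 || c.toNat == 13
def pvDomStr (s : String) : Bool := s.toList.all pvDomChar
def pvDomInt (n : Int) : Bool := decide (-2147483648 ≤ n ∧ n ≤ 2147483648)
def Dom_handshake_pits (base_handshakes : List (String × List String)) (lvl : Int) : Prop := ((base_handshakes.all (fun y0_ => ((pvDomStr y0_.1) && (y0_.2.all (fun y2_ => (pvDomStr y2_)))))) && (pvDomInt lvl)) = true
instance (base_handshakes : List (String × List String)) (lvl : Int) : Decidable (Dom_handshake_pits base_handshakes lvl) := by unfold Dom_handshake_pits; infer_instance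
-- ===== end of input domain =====

-- B replaces A's per-level frontier-set iteration by a single BFS per name that builds a distance
-- table once and then buckets it by layer (objective: alternative decomposition, same exact result).

-- ===== PORT A =====
-- A keeps two outer dicts keyed by name and builds, per name, a dict {iter : frontier set} level by level.
def pvAStep (base : PySem.Dict String (List String)) (lvl : Int)
    (st : PySem.Dict String (PySem.Dict Int (PySem.Set String)) × PySem.Dict String (PySem.Set String))
    (name : String) :
    PySem.Dict String (PySem.Dict Int (PySem.Set String)) × PySem.Dict String (PySem.Set String) :=
  let st0 := (st.1.insert name PySem.Dict.empty,
              st.2.insert name (PySem.Set.add PySem.Set.empty name))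
  (PySem.List.pyRange 0 lvl 1).foldl
    (fun st2 iter =>
      let iterh : PySem.Set String :=
        if iter == 0 then
          -- base_handshakes[name]: name is a key here (loop runs over base.keys), so getD is exact
          PySem.Set.union PySem.Set.empty (base.getD name [])
        else
          ((st2.1.getD name PySem.Dict.empty).getD (iter - 1) []).foldl
            (fun acc new_name =>
              if base.contains new_name = true then PySem.Set.update acc (base.getD new_name [])
              else acc)
            PySem.Set.empty
      (st2.1.modify name PySem.Dict.empty
         (fun d => d.insert iter (PySem.Set.diff iterh (st2.2.getD name []))),
       st2.2.modify name [] (fun s => PySem.Set.update s iterh)))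
    st0

def handshake_pits (base_handshakes : List (String × List String)) (lvl : Int) :
    List (String × List (Int × List String)) :=
  let base := PySem.Dict.ofList base_handshakes
  ((base.keys.foldl (pvAStep base lvl) (PySem.Dict.empty, PySem.Dict.empty)).1.items).map
    (fun p => (p.1, p.2.items))

-- ===== PORT B =====
-- B-side helpers: one expansion step of the BFS, the lemmas pvBfs's termination measure needs,
-- and the BFS loop itself (B's `while queue` loop; the Lean recursion is on the unpopped suffix).

def pvExpandStep (dnew : Int) (st : PySem.Dict String Int × List String) (q : String) :
    PySem.Dict String Int × List String :=
  if st.1.contains q = true then st else (st.1.insert q dnew, st.2 ++ [q])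

theorem pvExpand_shift (dnew : Int) (l : List String) (dist : PySem.Dict String Int) (acc : List String) :
    l.foldl (pvExpandStep dnew) (dist, acc)
      = ((l.foldl (pvExpandStep dnew) (dist, [])).1, acc ++ (l.foldl (pvExpandStep dnew) (dist, [])).2) := by
  induction l generalizing dist acc with
  | nil => simp
  | cons q l ih =>
      simp only [List.foldl_cons, pvExpandStep]
      cases hq : dist.contains q with
      | true => rw [if_pos rfl, if_pos rfl]; exact ih dist acc
      | false =>
          rw [if_neg (by simp), if_neg (by simp), List.nil_append]
          rw [ih _ (acc ++ [q]), ih _ [q]]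
          simp

theorem pvInsert_filter_len (U : List String) (hU : U.Nodup) (dist : PySem.Dict String Int)
    (q : String) (v : Int) (hq : q ∈ U) (hnc : dist.contains q = false) :
    (U.filter (fun x => !(dist.insert q v).contains x)).length + 1
      = (U.filter (fun x => !dist.contains x)).length := by
  have hfe : ∀ x ∈ U, (!(dist.insert q v).contains x) = ((x != q) && !dist.contains x) := by
    intro x _
    rw [PySem.Dict.contains_insert]
    cases h1 : (x == q) <;> cases h2 : dist.contains x <;> simp [h1, bne]
  rw [List.filter_congr hfe, ← List.filter_filter]
  have hV : (U.filter (fun x => !dist.contains x)).Nodup := hU.filter _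
  have hqV : q ∈ U.filter (fun x => !dist.contains x) := by
    rw [List.mem_filter]; exact ⟨hq, by simp [hnc]⟩
  rw [← hV.erase_eq_filter q, List.length_erase_of_mem hqV]
  have : 1 ≤ (U.filter (fun x => !dist.contains x)).length := List.length_pos_of_mem hqV
  omega

theorem pvExpand_count (dnew : Int) (l : List String) (dist : PySem.Dict String Int)
    (U : List String) (hU : U.Nodup) (hsub : ∀ q ∈ l, q ∈ U) :
    (U.filter (fun x => !(l.foldl (pvExpandStep dnew) (dist, [])).1.contains x)).length
      + ((l.foldl (pvExpandStep dnew) (dist, [])).2).length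
      = (U.filter (fun x => !dist.contains x)).length := by
  induction l generalizing dist with
  | nil => simp
  | cons q l ih =>
      simp only [List.foldl_cons, pvExpandStep]
      cases hq : dist.contains q with
      | true =>
          rw [if_pos rfl]
          exact ih dist (fun q' hq' => hsub q' (List.mem_cons_of_mem _ hq'))
      | false =>
          rw [if_neg (by simp), List.nil_append]
          rw [pvExpand_shift _ _ _ [q]]
          have h1 := ih (dist.insert q dnew) (fun q' hq' => hsub q' (List.mem_cons_of_mem _ hq'))
          have h2 := pvInsert_filter_len U hU dist q dnew (hsub q List.mem_cons_self) hq
          simp only [List.length_append, List.length_singleton]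
          omega

theorem pvGetD_mem_values (base : PySem.Dict String (List String)) (p : String)
    (h : base.contains p = true) : base.getD p [] ∈ base.values := by
  rw [PySem.Dict.contains_eq_isSome_get?] at h
  cases hg : base.get? p with
  | none => rw [hg] at h; simp at h
  | some v =>
      rw [PySem.Dict.getD_of_get?_eq_some _ _ hg]
      have := PySem.Dict.mem_items_of_get?_eq_some _ hg
      exact List.mem_map_of_mem this

def pvBfs (base : PySem.Dict String (List String)) (lvl : Int)
    (queue : List String) (dist : PySem.Dict String Int) : PySem.Dict String Int :=
  match queue with
  | [] => dist
  | p :: rest =>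
      -- dist[p] never raises in Python (every queued name is a key of dist); getD is exact here
      let d := dist.getD p 0
      if _h : d < lvl ∧ base.contains p = true then
        let st := (base.getD p []).foldl (pvExpandStep (d + 1)) (dist, [])
        pvBfs base lvl (rest ++ st.2) st.1
      else
        pvBfs base lvl rest dist
termination_by ((PySem.Set.ofList (base.values.flatMap id)).filter
    (fun x => !(dist.contains x))).length + queue.length
decreasing_by
  · have hcount := pvExpand_count (dist.getD p 0 + 1) (base.getD p []) dist
      (PySem.Set.ofList (base.values.flatMap id))
      (PySem.Set.nodup_ofList _)
      (by
        intro q hq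
        rw [PySem.Set.mem_ofList]
        exact List.mem_flatMap.2 ⟨base.getD p [], by simpa using pvGetD_mem_values base p _h.2, by simpa using hq⟩)
    simp only [List.length_append, List.length_cons]
    omega
  · simp only [List.length_cons]
    omega

def handshake_pits_alt (base_handshakes : List (String × List String)) (lvl : Int) :
    List (String × List (Int × List String)) :=
  let base := PySem.Dict.ofList base_handshakes
  ((base.keys.foldl
      (fun (hs : PySem.Dict String (PySem.Dict Int (PySem.Set String))) name =>
        let dist := pvBfs base lvl [name] (PySem.Dict.empty.insert name 0)
        let result0 : PySem.Dict Int (PySem.Set String) :=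
          PySem.Dict.ofList ((PySem.List.pyRange 0 lvl 1).map
            (fun i => (i, (PySem.Set.empty : PySem.Set String))))
        -- result[d-1].add(person): the key d-1 is always present (1 ≤ d ≤ lvl), so modify is exact
        let result := dist.items.foldl
          (fun r pd =>
            if pd.1 != name then r.modify (pd.2 - 1) [] (fun s => PySem.Set.add s pd.1) else r)
          result0
        hs.insert name result)
      PySem.Dict.empty).items).map
    (fun p => (p.1, p.2.items))

-- ===== PRECONDITION & SPEC =====
def Spec_handshake_pits (base_handshakes : List (String × List String)) (lvl : Int) (out : List (String × List (Int × List String))) : Prop := out = handshake_pits_alt base_handshakes lvl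
instance (base_handshakes : List (String × List String)) (lvl : Int) (out : List (String × List (Int × List String))) : Decidable (Spec_handshake_pits base_handshakes lvl out) := by unfold Spec_handshake_pits; infer_instance

-- ===== CLAIM (what is proved, stated in full; the proofs are below) =====
def Claim_equal_handshake_pits : Prop := ∀ (base_handshakes : List (String × List String)) (lvl : Int), Dom_handshake_pits base_handshakes lvl → Spec_handshake_pits base_handshakes lvl (handshake_pits base_handshakes lvl)

-- ===== LEMMAS AND PROOFS =====

theorem pvExpand_items (dnew : Int) (l : List String) (dist : PySem.Dict String Int) :
    (l.foldl (pvExpandStep dnew) (dist, [])).1.items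
      = dist.items ++ ((l.foldl (pvExpandStep dnew) (dist, [])).2).map (fun q => (q, dnew)) := by
  induction l generalizing dist with
  | nil => simp
  | cons q l ih =>
      simp only [List.foldl_cons, pvExpandStep]
      cases hq : dist.contains q with
      | true => rw [if_pos rfl]; simpa using ih dist
      | false =>
          rw [if_neg (by simp), List.nil_append]
          rw [pvExpand_shift _ _ _ [q]]
          simp only [ih]
          rw [PySem.Dict.items_insert_of_not_contains _ _ hq]
          simp

theorem pvExpand_mem (dnew : Int) (l : List String) (dist : PySem.Dict String Int) :
    ∀ q ∈ (l.foldl (pvExpandStep dnew) (dist, [])).2, q ∈ l ∧ dist.contains q = false := by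
  induction l generalizing dist with
  | nil => simp
  | cons q l ih =>
      simp only [List.foldl_cons, pvExpandStep]
      cases hq : dist.contains q with
      | true =>
          rw [if_pos rfl]
          intro x hx
          rcases ih dist x hx with ⟨h1, h2⟩
          exact ⟨List.mem_cons_of_mem _ h1, h2⟩
      | false =>
          rw [if_neg (by simp), List.nil_append]
          rw [pvExpand_shift _ _ _ [q]]
          intro x hx
          rcases List.mem_append.1 hx with hx | hx
          · simp at hx; subst hx; exact ⟨List.mem_cons_self, hq⟩
          · rcases ih _ x hx with ⟨h1, h2⟩
            rw [PySem.Dict.contains_insert] at h2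
            simp at h2
            exact ⟨List.mem_cons_of_mem _ h1, h2.2⟩

theorem pvExpand_nodup (dnew : Int) (l : List String) (dist : PySem.Dict String Int) :
    ((l.foldl (pvExpandStep dnew) (dist, [])).2).Nodup := by
  induction l generalizing dist with
  | nil => simp
  | cons q l ih =>
      simp only [List.foldl_cons, pvExpandStep]
      cases hq : dist.contains q with
      | true => rw [if_pos rfl]; exact ih dist
      | false =>
          rw [if_neg (by simp), List.nil_append]
          rw [pvExpand_shift _ _ _ [q]]
          refine List.nodup_append.2 ⟨List.nodup_singleton _, ih _, fun a ha b hb => ?_⟩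
          simp only [List.mem_singleton] at ha
          subst ha
          rcases pvExpand_mem dnew l _ b hb with ⟨_, h2⟩
          rw [PySem.Dict.contains_insert] at h2
          rintro rfl
          simp at h2

theorem pvExpand_keys (dnew : Int) (l : List String) (dist : PySem.Dict String Int) :
    (l.foldl (pvExpandStep dnew) (dist, [])).1.keys
      = dist.keys ++ (l.foldl (pvExpandStep dnew) (dist, [])).2 := by
  simp only [PySem.Dict.keys, pvExpand_items]
  simp [Function.comp_def]

theorem pvExpand_get?_old (dnew : Int) (l : List String) (dist : PySem.Dict String Int)
    (x : String) (hx : dist.contains x = true) :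
    (l.foldl (pvExpandStep dnew) (dist, [])).1.get? x = dist.get? x := by
  rw [PySem.Dict.contains_eq_isSome_get?] at hx
  cases hf : List.find? (fun p => p.1 == x) dist.items with
  | none =>
      rw [PySem.Dict.get?, hf] at hx
      simp at hx
  | some p =>
      simp only [PySem.Dict.get?]
      rw [pvExpand_items, List.find?_append, hf]
      rfl


-- Proof-side definitions: the canonical level-synchronous BFS state.

def pvFlat (base : PySem.Dict String (List String)) (lvl : Int) (d : Int)
    (front : List String) : List String :=
  (front.filter (fun p => decide (d < lvl) && base.contains p)).flatMap (fun p => base.getD p [])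

def pvLevels (base : PySem.Dict String (List String)) (lvl : Int) (name : String) :
    Nat → PySem.Dict String Int × List String
  | 0 => (PySem.Dict.empty.insert name 0, [name])
  | k + 1 =>
      let prev := pvLevels base lvl name k
      (pvFlat base lvl (k : Int) prev.2).foldl (pvExpandStep ((k : Int) + 1)) (prev.1, [])

-- A's per-name local loop (the body of pvAStep seen on the name-local state).
def pvALocalStep (base : PySem.Dict String (List String)) (name : String)
    (st : PySem.Dict Int (PySem.Set String) × PySem.Set String) (iter : Int) :
    PySem.Dict Int (PySem.Set String) × PySem.Set String :=
  let iterh : PySem.Set String :=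
    if iter == 0 then
      PySem.Set.union PySem.Set.empty (base.getD name [])
    else
      (st.1.getD (iter - 1) []).foldl
        (fun acc new_name =>
          if base.contains new_name = true then PySem.Set.update acc (base.getD new_name [])
          else acc)
        PySem.Set.empty
  (st.1.insert iter (PySem.Set.diff iterh st.2), PySem.Set.update st.2 iterh)

def pvValA (base : PySem.Dict String (List String)) (lvl : Int) (name : String) :
    PySem.Dict Int (PySem.Set String) × PySem.Set String :=
  (PySem.List.pyRange 0 lvl 1).foldl (pvALocalStep base name)
    (PySem.Dict.empty, PySem.Set.add PySem.Set.empty name)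

def pvValB (base : PySem.Dict String (List String)) (lvl : Int) (name : String) :
    PySem.Dict Int (PySem.Set String) :=
  let dist := pvBfs base lvl [name] (PySem.Dict.empty.insert name 0)
  let result0 : PySem.Dict Int (PySem.Set String) :=
    PySem.Dict.ofList ((PySem.List.pyRange 0 lvl 1).map
      (fun i => (i, (PySem.Set.empty : PySem.Set String))))
  dist.items.foldl
    (fun r pd =>
      if pd.1 != name then r.modify (pd.2 - 1) [] (fun s => PySem.Set.add s pd.1) else r)
    result0

-- == A-side localization ==

theorem pvAStep_eq (base : PySem.Dict String (List String)) (lvl : Int)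
    (st : PySem.Dict String (PySem.Dict Int (PySem.Set String)) × PySem.Dict String (PySem.Set String))
    (name : String) :
    pvAStep base lvl st name
      = (st.1.insert name (pvValA base lvl name).1, st.2.insert name (pvValA base lvl name).2) := by
  have main : ∀ (rng : List Int) (H : PySem.Dict String (PySem.Dict Int (PySem.Set String)))
      (AL : PySem.Dict String (PySem.Set String)) (h : PySem.Dict Int (PySem.Set String))
      (a : PySem.Set String),
      rng.foldl
        (fun st2 iter =>
          let iterh : PySem.Set String :=
            if iter == 0 then
              PySem.Set.union PySem.Set.empty (base.getD name [])
            else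
              ((st2.1.getD name PySem.Dict.empty).getD (iter - 1) []).foldl
                (fun acc new_name =>
                  if base.contains new_name = true then PySem.Set.update acc (base.getD new_name [])
                  else acc)
                PySem.Set.empty
          (st2.1.modify name PySem.Dict.empty
             (fun d => d.insert iter (PySem.Set.diff iterh (st2.2.getD name []))),
           st2.2.modify name [] (fun s => PySem.Set.update s iterh)))
        (H.insert name h, AL.insert name a)
      = (H.insert name (rng.foldl (pvALocalStep base name) (h, a)).1,
         AL.insert name (rng.foldl (pvALocalStep base name) (h, a)).2) := by
    intro rng
    induction rng with
    | nil => intro H AL h a; rfl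
    | cons iter rng ih =>
        intro H AL h a
        rw [List.foldl_cons, List.foldl_cons]
        have e1 : (H.insert name h).getD name PySem.Dict.empty = h :=
          PySem.Dict.getD_insert_self _ _ _ _
        have e2 : (AL.insert name a).getD name [] = a :=
          PySem.Dict.getD_insert_self _ _ _ _
        simp only [PySem.Dict.modify, e1, e2, PySem.Dict.insert_insert_self]
        exact ih H AL _ _
  simp only [pvAStep, pvValA]
  exact main _ st.1 st.2 _ _

-- == level-sync facts ==

theorem pvLevels_items (base : PySem.Dict String (List String)) (lvl : Int) (name : String) (k : Nat) :
    (pvLevels base lvl name k).1.items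
      = (name, 0) :: (List.range k).flatMap
          (fun j => ((pvLevels base lvl name (j + 1)).2).map (fun q => (q, ((j : Int) + 1)))) := by
  induction k with
  | zero => rfl
  | succ k ih =>
      show ((pvFlat base lvl (k : Int) (pvLevels base lvl name k).2).foldl
          (pvExpandStep ((k : Int) + 1)) ((pvLevels base lvl name k).1, [])).1.items = _
      rw [pvExpand_items, ih, List.range_succ, List.flatMap_append]
      simp [pvLevels]

theorem pvLevels_nodup_keys (base : PySem.Dict String (List String)) (lvl : Int) (name : String) (k : Nat) :
    (pvLevels base lvl name k).1.keys.Nodup := by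
  induction k with
  | zero => simp [pvLevels, PySem.Dict.keys, PySem.Dict.insert, PySem.Dict.empty]
  | succ k ih =>
      show ((pvFlat base lvl (k : Int) (pvLevels base lvl name k).2).foldl
          (pvExpandStep ((k : Int) + 1)) ((pvLevels base lvl name k).1, [])).1.keys.Nodup
      rw [pvExpand_keys]
      refine List.nodup_append.2 ⟨ih, pvExpand_nodup _ _ _, fun a ha b hb => ?_⟩
      rcases pvExpand_mem _ _ _ b hb with ⟨_, h2⟩
      intro hab
      subst hab
      exact absurd ((PySem.Dict.contains_iff_mem_keys _ _).2 ha) (by simp [h2])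

theorem pvLevels_get? (base : PySem.Dict String (List String)) (lvl : Int) (name : String) (k : Nat) :
    ∀ p ∈ (pvLevels base lvl name k).2, (pvLevels base lvl name k).1.get? p = some (k : Int) := by
  intro p hp
  cases k with
  | zero =>
      simp only [pvLevels, List.mem_singleton] at hp
      subst hp
      exact PySem.Dict.get?_insert_self _ _ _
  | succ k =>
      apply PySem.Dict.get?_of_mem_items _ _ (pvLevels_nodup_keys base lvl name (k + 1))
      rw [pvLevels_items base lvl name (k + 1), List.range_succ, List.flatMap_append]
      refine List.mem_cons_of_mem _ (List.mem_append_right _ ?_)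
      simp only [List.flatMap_singleton]
      have : ((k + 1 : Nat) : Int) = (k : Int) + 1 := by push_cast; ring
      rw [this]
      exact List.mem_map_of_mem hp

theorem pvLevels_front_nodup (base : PySem.Dict String (List String)) (lvl : Int) (name : String) (k : Nat) :
    ((pvLevels base lvl name k).2).Nodup := by
  cases k with
  | zero => simp [pvLevels]
  | succ k => exact pvExpand_nodup _ _ _

theorem pvLevels_name_not_mem (base : PySem.Dict String (List String)) (lvl : Int) (name : String) (k : Nat) :
    name ∉ (pvLevels base lvl name (k + 1)).2 := by
  intro hmem
  rcases pvExpand_mem _ _ _ name hmem with ⟨_, h2⟩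
  have : name ∈ (pvLevels base lvl name k).1.keys := by
    rw [PySem.Dict.keys, pvLevels_items]
    exact List.mem_map_of_mem List.mem_cons_self
  exact absurd ((PySem.Dict.contains_iff_mem_keys _ _).2 this) (by simp [h2])

theorem pvBfs_nil (base : PySem.Dict String (List String)) (lvl : Int)
    (dist : PySem.Dict String Int) : pvBfs base lvl [] dist = dist := by
  rw [pvBfs]

theorem pvBfs_cons (base : PySem.Dict String (List String)) (lvl : Int) (p : String)
    (rest : List String) (dist : PySem.Dict String Int) :
    pvBfs base lvl (p :: rest) dist
      = if dist.getD p 0 < lvl ∧ base.contains p = true then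
          pvBfs base lvl
            (rest ++ ((base.getD p []).foldl (pvExpandStep (dist.getD p 0 + 1)) (dist, [])).2)
            ((base.getD p []).foldl (pvExpandStep (dist.getD p 0 + 1)) (dist, [])).1
        else pvBfs base lvl rest dist := by
  rw [pvBfs]
  split
  · rfl
  · rfl

theorem pvBfs_flat (base : PySem.Dict String (List String)) (lvl : Int) (d : Int) :
    ∀ (front acc : List String) (dist : PySem.Dict String Int),
      (∀ p ∈ front, dist.get? p = some d) →
      pvBfs base lvl (front ++ acc) dist
        = pvBfs base lvl
            (acc ++ ((pvFlat base lvl d front).foldl (pvExpandStep (d + 1)) (dist, [])).2)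
            ((pvFlat base lvl d front).foldl (pvExpandStep (d + 1)) (dist, [])).1 := by
  intro front
  induction front with
  | nil => intro acc dist _; simp [pvFlat]
  | cons p rest ih =>
      intro acc dist hfront
      have hd : dist.getD p 0 = d := by
        rw [PySem.Dict.getD_eq_get?_getD, hfront p List.mem_cons_self]
        rfl
      rw [List.cons_append, pvBfs_cons, hd]
      by_cases hc : d < lvl ∧ base.contains p = true
      · rw [if_pos hc]
        have hflat : pvFlat base lvl d (p :: rest)
            = base.getD p [] ++ pvFlat base lvl d rest := by
          unfold pvFlat
          rw [List.filter_cons_of_pos (by simp [hc.1, hc.2]), List.flatMap_cons]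
        set st := (base.getD p []).foldl (pvExpandStep (d + 1)) (dist, []) with hst
        have hppres : ∀ p' ∈ rest, st.1.get? p' = some d := by
          intro p' hp'
          rw [hst, pvExpand_get?_old]
          · exact hfront p' (List.mem_cons_of_mem _ hp')
          · rw [PySem.Dict.contains_eq_isSome_get?, hfront p' (List.mem_cons_of_mem _ hp')]
            rfl
        have := ih (acc ++ st.2) st.1 hppres
        rw [List.append_assoc, this, hflat, List.foldl_append, ← hst]
        conv_rhs => rw [show st = (st.1, st.2) from rfl, pvExpand_shift]
        simp
      · rw [if_neg hc]
        have hflat : pvFlat base lvl d (p :: rest) = pvFlat base lvl d rest := by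
          unfold pvFlat
          rw [List.filter_cons_of_neg (by
            rcases Decidable.not_and_iff_not_or_not.1 hc with h | h <;> simp [h])]
        rw [hflat]
        exact ih acc dist (fun p' hp' => hfront p' (List.mem_cons_of_mem _ hp'))

theorem pvBfs_levels (base : PySem.Dict String (List String)) (lvl : Int) (name : String) (k : Nat) :
    pvBfs base lvl (pvLevels base lvl name k).2 (pvLevels base lvl name k).1
      = pvBfs base lvl (pvLevels base lvl name (k + 1)).2 (pvLevels base lvl name (k + 1)).1 := by
  have := pvBfs_flat base lvl (k : Int) (pvLevels base lvl name k).2 []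
    (pvLevels base lvl name k).1 (pvLevels_get? base lvl name k)
  rw [List.append_nil] at this
  rw [this]
  rfl

theorem pvLevels_final (base : PySem.Dict String (List String)) (lvl : Int) (name : String) :
    pvLevels base lvl name (lvl.toNat + 1) = ((pvLevels base lvl name lvl.toNat).1, []) := by
  show ((pvFlat base lvl (lvl.toNat : Int) (pvLevels base lvl name lvl.toNat).2).foldl
      (pvExpandStep ((lvl.toNat : Int) + 1)) ((pvLevels base lvl name lvl.toNat).1, [])) = _
  have : pvFlat base lvl (lvl.toNat : Int) (pvLevels base lvl name lvl.toNat).2 = [] := by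
    unfold pvFlat
    rw [List.filter_congr (fun x _ => by simp : ∀ x ∈ (pvLevels base lvl name lvl.toNat).2,
      (decide ((lvl.toNat : Int) < lvl) && base.contains x) = false)]
    simp
  rw [this]
  rfl

theorem pvBfs_eq_levels (base : PySem.Dict String (List String)) (lvl : Int) (name : String) :
    pvBfs base lvl [name] (PySem.Dict.empty.insert name 0)
      = (pvLevels base lvl name lvl.toNat).1 := by
  have chain : ∀ j : Nat, pvBfs base lvl [name] (PySem.Dict.empty.insert name 0)
      = pvBfs base lvl (pvLevels base lvl name j).2 (pvLevels base lvl name j).1 := by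
    intro j
    induction j with
    | zero => rfl
    | succ j ih => rw [ih, pvBfs_levels]
  rw [chain (lvl.toNat + 1), pvLevels_final]
  exact pvBfs_nil _ _ _

-- == the frontier as A computes it ==

theorem pvDiff_news (dnew : Int) (l : List String) (dist : PySem.Dict String Int) (al : List String)
    (hal : ∀ x, dist.contains x = true ↔ x ∈ al) :
    (l.foldl (pvExpandStep dnew) (dist, [])).2 = PySem.Set.diff (PySem.Set.ofList l) al := by
  induction l generalizing dist al with
  | nil => simp [PySem.Set.diff, PySem.Set.ofList]
  | cons q l ih =>
      simp only [List.foldl_cons, pvExpandStep]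
      cases hq : dist.contains q with
      | true =>
          rw [if_pos rfl]
          have hqal : q ∈ al := (hal q).1 hq
          rw [ih dist al hal, PySem.Set.ofList_cons]
          show _ = List.filter (fun x => !PySem.Set.contains al x)
            (q :: List.filter (fun y => !(y == q)) (PySem.Set.ofList l))
          rw [List.filter_cons_of_neg (by simp [PySem.Set.contains, hqal]), List.filter_filter]
          show List.filter (fun x => !PySem.Set.contains al x) (PySem.Set.ofList l) = _
          refine (List.filter_congr ?_).symm
          intro x _
          by_cases hxq : x = q
          · subst hxq; simp [PySem.Set.contains, hqal]
          · simp [hxq]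
      | false =>
          rw [if_neg (by simp), List.nil_append, pvExpand_shift _ _ _ [q]]
          have hqal : q ∉ al := fun hmem => by
            have := (hal q).2 hmem; rw [hq] at this; exact absurd this (by simp)
          have hal' : ∀ x, (dist.insert q dnew).contains x = true ↔ x ∈ al ++ [q] := by
            intro x
            rw [PySem.Dict.contains_insert]
            constructor
            · intro hx
              rcases Bool.or_eq_true_iff.1 hx with hx | hx
              · exact List.mem_append_right _ (by simpa using (beq_iff_eq.1 hx))
              · exact List.mem_append_left _ ((hal x).1 hx)
            · intro hx
              rcases List.mem_append.1 hx with hx | hx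
              · exact Bool.or_eq_true_iff.2 (Or.inr ((hal x).2 hx))
              · exact Bool.or_eq_true_iff.2 (Or.inl (by simp at hx; simp [hx]))
          rw [ih (dist.insert q dnew) (al ++ [q]) hal', PySem.Set.ofList_cons]
          show _ = List.filter (fun x => !PySem.Set.contains al x)
            (q :: List.filter (fun y => !(y == q)) (PySem.Set.ofList l))
          rw [List.filter_cons_of_pos (by simp [PySem.Set.contains, hqal]), List.filter_filter]
          show q :: List.filter (fun x => !PySem.Set.contains (al ++ [q]) x) (PySem.Set.ofList l) = _
          refine congrArg (q :: ·) (List.filter_congr ?_)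
          intro x _
          by_cases hxq : x = q
          · subst hxq; simp [PySem.Set.contains]
          · simp [PySem.Set.contains, hxq]

theorem pvUpdate_fold (g : String → List String) (c : String → Bool) :
    ∀ (fr : List String) (s : PySem.Set String),
      fr.foldl (fun acc nn => if c nn = true then PySem.Set.update acc (g nn) else acc) s
        = PySem.Set.update s ((fr.filter c).flatMap g) := by
  intro fr
  induction fr with
  | nil => intro s; simp [PySem.Set.update]
  | cons nn fr ih =>
      intro s
      rw [List.foldl_cons]
      cases hc : c nn with
      | true =>
          rw [if_pos rfl, List.filter_cons_of_pos hc, List.flatMap_cons,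
            PySem.Set.update_append]
          exact ih _
      | false =>
          rw [if_neg (by simp), List.filter_cons_of_neg (by simp [hc])]
          exact ih _

theorem pvA_local_levels (base : PySem.Dict String (List String)) (lvl : Int) (name : String)
    (hname : base.contains name = true) (m : Nat) (hm : (m : Int) ≤ lvl) :
    ((PySem.List.pyRange 0 (m : Int) 1).foldl (pvALocalStep base name)
        (PySem.Dict.empty, PySem.Set.add PySem.Set.empty name)).1.items
        = (List.range m).map (fun (j : Nat) => ((j : Int), (pvLevels base lvl name (j + 1)).2))
      ∧ ∀ x, ((pvLevels base lvl name m).1.contains x = true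
          ↔ x ∈ ((PySem.List.pyRange 0 (m : Int) 1).foldl (pvALocalStep base name)
              (PySem.Dict.empty, PySem.Set.add PySem.Set.empty name)).2) := by
  induction m with
  | zero =>
      rw [PySem.List.pyRange_one_eq_nil (by norm_num)]
      constructor
      · rfl
      · intro x
        show (PySem.Dict.empty.insert name 0).contains x = true ↔ x ∈ [name]
        rw [PySem.Dict.contains_insert]
        simp
  | succ m ih =>
      have hmlt : (m : Int) < lvl := by push_cast at hm ⊢; omega
      rcases ih (le_of_lt hmlt) with ⟨ih1, ih2⟩
      have hrng : PySem.List.pyRange 0 ((m + 1 : Nat) : Int) 1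
          = PySem.List.pyRange 0 (m : Int) 1 ++ [(m : Int)] := by
        have h1 : ((m + 1 : Nat) : Int) = (m : Int) + 1 := by push_cast; ring
        rw [h1, PySem.List.pyRange_one_succ_right (by positivity)]
      rw [hrng, List.foldl_append, List.foldl_cons, List.foldl_nil]
      set Hm := ((PySem.List.pyRange 0 (m : Int) 1).foldl (pvALocalStep base name)
        (PySem.Dict.empty, PySem.Set.add PySem.Set.empty name)) with hHm
      have hkeysHm : Hm.1.keys = (List.range m).map (fun (j : Nat) => (j : Int)) := by
        rw [PySem.Dict.keys, ih1, List.map_map]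
        rfl
      have hkeysm : Hm.1.keys.Nodup := by
        rw [hkeysHm]
        exact List.nodup_range.map (fun a b h => by exact_mod_cast h)
      have hiterh : (if ((m : Int) == 0) then
              PySem.Set.union PySem.Set.empty (base.getD name [])
            else
              ((Hm.1.getD ((m : Int) - 1) []).foldl
                (fun acc new_name =>
                  if base.contains new_name = true then PySem.Set.update acc (base.getD new_name [])
                  else acc)
                PySem.Set.empty))
          = PySem.Set.ofList (pvFlat base lvl (m : Int) (pvLevels base lvl name m).2) := by
        cases m with
        | zero =>
            rw [if_pos (by norm_num)]
            have hf : pvFlat base lvl ((0 : Nat) : Int) (pvLevels base lvl name 0).2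
                = base.getD name [] := by
              unfold pvFlat
              show (([name].filter (fun p => decide (((0 : Nat) : Int) < lvl) && base.contains p)).flatMap
                (fun p => base.getD p [])) = _
              rw [List.filter_cons_of_pos (by simp; constructor; exact_mod_cast hmlt; exact hname)]
              simp
            rw [hf]
            show PySem.Set.update PySem.Set.empty (base.getD name []) = _
            rw [PySem.Set.update_empty]
        | succ k =>
            rw [if_neg (by simp; omega)]
            have hgetD : Hm.1.getD (((k + 1 : Nat) : Int) - 1) [] = (pvLevels base lvl name (k + 1)).2 := by
              apply PySem.Dict.getD_of_mem_items _ _ hkeysm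
              rw [ih1]
              have h1 : ((k + 1 : Nat) : Int) - 1 = ((k : Nat) : Int) := by push_cast; ring
              rw [h1]
              exact List.mem_map_of_mem (List.mem_range.2 (Nat.lt_succ_self k))
            rw [hgetD, pvUpdate_fold (fun p => base.getD p []) (fun nn => base.contains nn),
              PySem.Set.update_empty]
            unfold pvFlat
            congr 1
            have : List.filter (fun p => decide (((k + 1 : Nat) : Int) < lvl) && base.contains p)
                (pvLevels base lvl name (k + 1)).2
                = List.filter (fun nn => base.contains nn) (pvLevels base lvl name (k + 1)).2 :=
              List.filter_congr (fun x _ => by have h := hmlt; push_cast at h; simp [h])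
            rw [this]
      have hstep : pvALocalStep base name Hm ((m : Nat) : Int)
          = (Hm.1.insert (m : Int)
              (PySem.Set.diff
                (PySem.Set.ofList (pvFlat base lvl (m : Int) (pvLevels base lvl name m).2)) Hm.2),
             PySem.Set.update Hm.2
              (PySem.Set.ofList (pvFlat base lvl (m : Int) (pvLevels base lvl name m).2))) := by
        show (Hm.1.insert _ _, PySem.Set.update _ _) = _
        rw [hiterh]
      rw [hstep]
      have hnews := pvDiff_news ((m : Int) + 1)
        (pvFlat base lvl (m : Int) (pvLevels base lvl name m).2)
        (pvLevels base lvl name m).1 Hm.2 ih2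
      have hF : (pvLevels base lvl name (m + 1)).2
          = PySem.Set.diff
              (PySem.Set.ofList (pvFlat base lvl (m : Int) (pvLevels base lvl name m).2)) Hm.2 := by
        rw [← hnews]; rfl
      constructor
      · show (Hm.1.insert (m : Int) _).items = _
        rw [← hF, PySem.Dict.items_insert_of_not_contains _ _ (by
          rw [← Bool.not_eq_true, PySem.Dict.contains_iff_mem_keys, hkeysHm]
          intro hmem
          rcases List.mem_map.1 hmem with ⟨j, hj, hj2⟩
          have h1 : j = m := by exact_mod_cast hj2
          have h2 := List.mem_range.1 hj
          omega)]
        rw [ih1, List.range_succ, List.map_append]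
        rfl
      · intro x
        have hkeys1 : (pvLevels base lvl name (m + 1)).1.keys
            = (pvLevels base lvl name m).1.keys ++ (pvLevels base lvl name (m + 1)).2 := by
          show ((pvFlat base lvl (m : Int) (pvLevels base lvl name m).2).foldl
            (pvExpandStep ((m : Int) + 1)) ((pvLevels base lvl name m).1, [])).1.keys = _
          rw [pvExpand_keys]
          rfl
        rw [PySem.Dict.contains_iff_mem_keys, hkeys1, List.mem_append,
          PySem.Set.mem_update, PySem.Set.mem_ofList]
        constructor
        · rintro (hx | hx)
          · exact Or.inl ((ih2 x).1 ((PySem.Dict.contains_iff_mem_keys _ _).2 hx))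
          · exact Or.inr (pvExpand_mem _ _ _ x hx).1
        · rintro (hx | hx)
          · exact Or.inl ((PySem.Dict.contains_iff_mem_keys _ _).1 ((ih2 x).2 hx))
          · by_cases hDx : (pvLevels base lvl name m).1.contains x = true
            · exact Or.inl ((PySem.Dict.contains_iff_mem_keys _ _).1 hDx)
            · refine Or.inr ?_
              have : x ∈ (pvLevels base lvl name (m + 1)).2 := by
                rw [hF, PySem.Set.mem_diff]
                exact ⟨(PySem.Set.mem_ofList _ _).2 hx,
                  fun hmem => absurd ((ih2 x).2 hmem) hDx⟩
              exact this

theorem pvValA_items (base : PySem.Dict String (List String)) (lvl : Int) (name : String)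
    (hname : base.contains name = true) :
    (pvValA base lvl name).1.items
      = (List.range lvl.toNat).map (fun (j : Nat) => ((j : Int), (pvLevels base lvl name (j + 1)).2)) := by
  unfold pvValA
  by_cases hl : 0 ≤ lvl
  · have hcast : lvl = ((lvl.toNat : Nat) : Int) := (Int.toNat_of_nonneg hl).symm
    rw [show PySem.List.pyRange 0 lvl 1 = PySem.List.pyRange 0 ((lvl.toNat : Nat) : Int) 1 by rw [← hcast]]
    exact (pvA_local_levels base lvl name hname lvl.toNat (le_of_eq hcast.symm)).1
  · rw [PySem.List.pyRange_one_eq_nil (by omega)]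
    rw [show lvl.toNat = 0 from Int.toNat_of_nonpos (by omega)]
    rfl

-- == B's bucketing ==

theorem pvResult0_items (lvl : Int) :
    (PySem.Dict.ofList ((PySem.List.pyRange 0 lvl 1).map
        (fun i => (i, (PySem.Set.empty : PySem.Set String))))).items
      = (PySem.List.pyRange 0 lvl 1).map (fun i => (i, (PySem.Set.empty : PySem.Set String))) := by
  have h := PySem.Dict.items_foldl_insert_fresh
    ((PySem.List.pyRange 0 lvl 1).map (fun i => (i, (PySem.Set.empty : PySem.Set String))))
    (fun p => p.1) (fun p => p.2) PySem.Dict.empty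
    (fun a _ => PySem.Dict.contains_empty _)
    (by
      rw [List.map_map]
      exact (PySem.List.nodup_pyRange_one 0 lvl).map (fun a b h => h))
  simpa using h

theorem pvBlock_fold (j : Int) :
    ∀ (xs : List String), xs ≠ [] → ∀ (r : PySem.Dict Int (PySem.Set String)),
      xs.foldl (fun r q => r.modify j [] (fun s => PySem.Set.add s q)) r
        = r.insert j (PySem.Set.update (r.getD j []) xs) := by
  intro xs
  induction xs with
  | nil => intro h; exact absurd rfl h
  | cons x xs ih =>
      intro _ r
      rw [List.foldl_cons]
      cases xs with
      | nil =>
          rw [List.foldl_nil, PySem.Set.update_cons, PySem.Set.update_nil]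
          rfl
      | cons y ys =>
          rw [show r.modify j [] (fun s => PySem.Set.add s x)
              = r.insert j (PySem.Set.add (r.getD j []) x) from rfl]
          rw [ih (by simp) _, PySem.Dict.getD_insert_self, PySem.Dict.insert_insert_self,
            PySem.Set.update_cons, PySem.Set.update_cons, PySem.Set.update_cons]

theorem pvInsert_shape (lvl : Int) (v : Int → PySem.Set String)
    (r : PySem.Dict Int (PySem.Set String))
    (hr : r.items = (PySem.List.pyRange 0 lvl 1).map (fun i => (i, v i)))
    (j : Int) (hj0 : 0 ≤ j) (hj1 : j < lvl) (w : PySem.Set String) :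
    (r.insert j w).items
      = (PySem.List.pyRange 0 lvl 1).map (fun i => (i, if i = j then w else v i)) := by
  have hcont : r.contains j = true := by
    rw [PySem.Dict.contains_iff_mem_keys, PySem.Dict.keys, hr, List.map_map]
    exact List.mem_map_of_mem (PySem.List.mem_pyRange_one.2 ⟨hj0, hj1⟩)
  rw [PySem.Dict.items_insert_of_contains _ _ hcont, hr, List.map_map]
  refine List.map_congr_left ?_
  intro i _
  by_cases hij : i = j
  · subst hij; simp
  · simp [hij]

theorem pvValB_items (base : PySem.Dict String (List String)) (lvl : Int) (name : String) :
    (pvValB base lvl name).items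
      = (List.range lvl.toNat).map (fun (j : Nat) => ((j : Int), (pvLevels base lvl name (j + 1)).2)) := by
  simp only [pvValB]
  rw [pvBfs_eq_levels, pvLevels_items]
  rw [List.foldl_cons, if_neg (by simp)]
  have main : ∀ t : Nat, t ≤ lvl.toNat →
      (((List.range t).flatMap
          (fun j => ((pvLevels base lvl name (j + 1)).2).map (fun q => (q, ((j : Int) + 1))))).foldl
        (fun r pd =>
          if pd.1 != name then r.modify (pd.2 - 1) [] (fun s => PySem.Set.add s pd.1) else r)
        (PySem.Dict.ofList ((PySem.List.pyRange 0 lvl 1).map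
          (fun i => (i, (PySem.Set.empty : PySem.Set String)))))).items
      = (PySem.List.pyRange 0 lvl 1).map
          (fun i => (i, if i < (t : Int) then (pvLevels base lvl name (i.toNat + 1)).2
            else (PySem.Set.empty : PySem.Set String))) := by
    intro t
    induction t with
    | zero =>
        intro _
        rw [List.range_zero, List.flatMap_nil, List.foldl_nil, pvResult0_items]
        refine List.map_congr_left ?_
        intro i hi
        have := PySem.List.mem_pyRange_one.1 hi
        rw [if_neg (by omega)]
    | succ t ih =>
        intro ht
        have htl : (t : Int) < lvl := by
          have h1 := Int.self_le_toNat lvl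
          have h2 : (t : Int) < (lvl.toNat : Int) := by exact_mod_cast ht
          have h3 : 0 ≤ (t : Int) := by positivity
          have h4 : 0 < lvl.toNat := by omega
          have h5 : 0 < lvl := by
            by_contra h6
            have := Int.toNat_of_nonpos (by omega : lvl ≤ 0)
            omega
          rw [Int.toNat_of_nonneg (by omega)] at h2
          exact h2
        rw [List.range_succ, List.flatMap_append, List.foldl_append, List.flatMap_singleton]
        set rT := ((List.range t).flatMap
          (fun j => ((pvLevels base lvl name (j + 1)).2).map (fun q => (q, ((j : Int) + 1))))).foldl
          (fun r pd =>
            if pd.1 != name then r.modify (pd.2 - 1) [] (fun s => PySem.Set.add s pd.1) else r)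
          (PySem.Dict.ofList ((PySem.List.pyRange 0 lvl 1).map
            (fun i => (i, (PySem.Set.empty : PySem.Set String))))) with hrT
        have hrTitems : rT.items = (PySem.List.pyRange 0 lvl 1).map
            (fun i => (i, if i < (t : Int) then (pvLevels base lvl name (i.toNat + 1)).2
              else (PySem.Set.empty : PySem.Set String))) := ih (by omega)
        cases hF : (pvLevels base lvl name (t + 1)).2 with
        | nil =>
            rw [List.map_nil, List.foldl_nil, hrTitems]
            refine List.map_congr_left ?_
            intro i hi
            rcases PySem.List.mem_pyRange_one.1 hi with ⟨hi0, hi1⟩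
            by_cases hit : i = (t : Int)
            · subst hit
              rw [if_neg (by omega), if_pos (by push_cast; omega)]
              rw [Int.toNat_natCast, hF]
              rfl
            · by_cases hlt2 : i < (t : Int)
              · rw [if_pos hlt2, if_pos (by push_cast; omega)]
              · rw [if_neg hlt2, if_neg (by push_cast; omega)]
        | cons x xs =>
            rw [List.foldl_map]
            rw [PySem.List.foldl_congr_mem (x :: xs) _
              (fun r q => r.modify (t : Int) [] (fun s => PySem.Set.add s q)) rT
              (by
                intro acc q hq
                have hnm := pvLevels_name_not_mem base lvl name t
                rw [hF] at hnm
                have hqname : q ≠ name := fun he => hnm (he ▸ hq)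
                show (if (q != name) = true then _ else _) = _
                rw [if_pos (by simp [hqname]), show ((t : Int) + 1) - 1 = (t : Int) by ring])]
            rw [pvBlock_fold (t : Int) (x :: xs) (by simp) rT]
            have hkeysrT : rT.keys = PySem.List.pyRange 0 lvl 1 := by
              rw [PySem.Dict.keys, hrTitems, List.map_map]
              simp [Function.comp_def]
            have htmem : (t : Int) ∈ PySem.List.pyRange 0 lvl 1 :=
              PySem.List.mem_pyRange_one.2 ⟨by positivity, htl⟩
            have hgetD : rT.getD (t : Int) [] = (PySem.Set.empty : PySem.Set String) := by
              apply PySem.Dict.getD_of_mem_items _ ?_ (by rw [hkeysrT]; exact PySem.List.nodup_pyRange_one 0 lvl)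
              rw [hrTitems]
              have := List.mem_map_of_mem
                (f := fun i => (i, if i < (t : Int) then (pvLevels base lvl name (i.toNat + 1)).2
                  else (PySem.Set.empty : PySem.Set String))) htmem
              simpa using this
            have hnodup : (x :: xs).Nodup := by
              rw [← hF]; exact pvLevels_front_nodup base lvl name (t + 1)
            rw [hgetD, PySem.Set.update_empty, PySem.Set.ofList_eq_self_of_nodup _ hnodup]
            rw [pvInsert_shape lvl _ rT hrTitems (t : Int) (by positivity) htl (x :: xs)]
            refine List.map_congr_left ?_
            intro i hi
            rcases PySem.List.mem_pyRange_one.1 hi with ⟨hi0, hi1⟩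
            by_cases hit : i = (t : Int)
            · subst hit
              rw [if_pos rfl, if_pos (by push_cast; omega), Int.toNat_natCast, hF]
            · by_cases hlt2 : i < (t : Int)
              · rw [if_neg hit, if_pos hlt2, if_pos (by push_cast; omega)]
              · rw [if_neg hit, if_neg hlt2, if_neg (by push_cast; omega)]
  have := main lvl.toNat (le_refl _)
  rw [this]
  rw [PySem.List.pyRange_one]
  rw [List.map_map, show (lvl - 0).toNat = lvl.toNat by omega]
  refine List.map_congr_left ?_
  intro j hj
  have hjlt := List.mem_range.1 hj
  have h0 : (0 : Int) + (j : Int) = (j : Int) := by ring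
  simp only [Function.comp_def, h0]
  rw [if_pos (by exact_mod_cast hjlt), Int.toNat_natCast]

theorem pvVal_eq (base : PySem.Dict String (List String)) (lvl : Int) (name : String)
    (hname : base.contains name = true) :
    (pvValA base lvl name).1 = pvValB base lvl name := by
  apply PySem.Dict.ext
  rw [pvValA_items base lvl name hname, pvValB_items base lvl name]

-- == outer glue ==

theorem pvOuter (base : PySem.Dict String (List String)) (lvl : Int) :
    ∀ (ks : List String), (∀ nm ∈ ks, base.contains nm = true) →
      ∀ (H : PySem.Dict String (PySem.Dict Int (PySem.Set String)))
        (AL : PySem.Dict String (PySem.Set String)),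
        (ks.foldl (pvAStep base lvl) (H, AL)).1
          = ks.foldl (fun hs nm => hs.insert nm (pvValB base lvl nm)) H := by
  intro ks hks
  induction ks with
  | nil => intro H AL; rfl
  | cons nm ks ih =>
      intro H AL
      rw [List.foldl_cons, List.foldl_cons, pvAStep_eq,
        pvVal_eq base lvl nm (hks nm List.mem_cons_self)]
      exact ih (fun x hx => hks x (List.mem_cons_of_mem _ hx)) _ _

-- ===== VERDICT (by name: the statement is the Claim_ definition above) =====
theorem handshake_pits_spec : Claim_equal_handshake_pits := by
  intro base_handshakes lvl _
  unfold Spec_handshake_pits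
  show handshake_pits base_handshakes lvl = handshake_pits_alt base_handshakes lvl
  simp only [handshake_pits, handshake_pits_alt]
  rw [pvOuter (PySem.Dict.ofList base_handshakes) lvl _
    (fun nm hnm => (PySem.Dict.contains_iff_mem_keys _ _).2 hnm)]
  rfl
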